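-- pv_equiv track=rewrite | github.com/kamiderka/WDI-2024 | Zestaw 2 - Tablice jednowymiarowe/zad086.py | most_4_compliant
-- ===== SOURCE A (Python) =====
-- def bin2dec(t :list)->int:
--     k = 1
--     result = 0
--     for i in range(0, len(t)):
--         if t[i]:
--             result += k
--         k*=2
--     return result
--
-- def type_of_comp(a :int)->int:
--     bin = [False for _ in range(4)]
--     while a > 0 and not all(bin):
--         bin[a%4]=True
--         a//=4
--     return bin2dec(bin)
--
-- def most_4_compliant(t :list)->int:
--     if len(t)<2:
--         return 0
--     types = [0 for _ in range(17)]
--     for i in range(0, len(t)):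
--         types[type_of_comp(t[i])]+=1
--     result = max(types)
--     return 0 if result < 2 else result
-- ===== SOURCE B (Python) =====
-- def _signature(a):
--     m = 0
--     while a > 0 and m != 15:
--         m |= 1 << (a % 4)
--         a //= 4
--     return m
--
-- def most_4_compliant(t):
--     if len(t) < 2:
--         return 0
--     sigs = sorted(_signature(x) for x in t)
--     best = 0
--     run = 0
--     prev = None
--     for s in sigs:
--         if prev is not None and s == prev:
--             run += 1
--         else:
--             run = 1
--             prev = s
--         if run > best:
--             best = run
--     return best if best >= 2 else 0
-- ===== Notes on version B (the rewrite author's own statement) =====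
-- stated objective: alternative
-- what changed: Replaces the fixed 17-slot histogram + max with a sort-then-scan mode computation: signatures (built as an integer bitmask instead of a bool array) are sorted and a single linear pass tracks the current and best run of equal signatures.
import Mathlib
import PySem

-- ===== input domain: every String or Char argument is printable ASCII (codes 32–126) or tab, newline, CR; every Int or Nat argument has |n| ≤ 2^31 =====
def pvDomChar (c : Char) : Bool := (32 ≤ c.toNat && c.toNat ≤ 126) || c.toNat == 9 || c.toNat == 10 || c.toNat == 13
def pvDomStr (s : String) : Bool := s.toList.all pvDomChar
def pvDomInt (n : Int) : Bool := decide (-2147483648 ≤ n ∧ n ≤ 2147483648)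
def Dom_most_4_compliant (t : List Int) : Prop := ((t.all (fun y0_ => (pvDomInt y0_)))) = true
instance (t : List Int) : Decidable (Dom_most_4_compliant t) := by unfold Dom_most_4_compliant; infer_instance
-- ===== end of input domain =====

-- B replaces A's fixed 17-slot histogram + max with sort-then-scan: it sorts the list of
-- bitmask signatures and finds the longest run of equal values in one linear pass.

-- ===== PORT A =====
-- bin2dec: k doubles each step, adds k where the entry is true
def pvBin2decGo : List Bool → Int → Int → Int
  | [], _, result => result
  | b :: rest, k, result => pvBin2decGo rest (k * 2) (if b then result + k else result)

def pvBin2dec (t : List Bool) : Int := pvBin2decGo t 1 0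

-- while a > 0 and not all(bin): bin[a%4] = True; a //= 4
-- (bin always has length 4 and 0 ≤ a%4 < 4, so Python's indexing never raises; pySetD is exact here)
def pvTypeLoop (a : Int) (bin : List Bool) : List Bool :=
  if _h : a > 0 ∧ ¬ (bin.all (fun b => b)) then
    pvTypeLoop (PySem.Int.floordiv a 4) (PySem.List.pySetD bin (PySem.Int.mod a 4) true)
  else bin
termination_by a.toNat
decreasing_by
  have h4 : PySem.Int.floordiv a 4 = a / 4 := PySem.Int.floordiv_eq_ediv_of_pos (by omega)
  omega

def pvTypeOfComp (a : Int) : Int := pvBin2dec (pvTypeLoop a [false, false, false, false])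

-- types[type_of_comp(t[i])] += 1  (the index is always in [0,16), so Python never raises here)
def pvHistStep (ts : List Int) (x : Int) : List Int :=
  let j := pvTypeOfComp x
  PySem.List.pySetD ts j (PySem.List.pyGetD ts j 0 + 1)

def most_4_compliant (t : List Int) : Int :=
  if t.length < 2 then 0
  else
    let types := t.foldl pvHistStep (List.replicate 17 (0 : Int))
    -- max(types): types has length 17, so Python's max never raises; the getD 0 default is never used
    let result := (PySem.List.max? types (fun y => y)).getD 0
    if result < 2 then 0 else result

-- ===== PORT B =====
-- while a > 0 and m != 15: m |= 1 << (a % 4); a //= 4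
def pvSigGo (a m : Int) : Int :=
  if _h : a > 0 ∧ m ≠ 15 then
    pvSigGo (PySem.Int.floordiv a 4) (PySem.Int.bor m ((1 : Int) <<< (PySem.Int.mod a 4).toNat))
  else m
termination_by a.toNat
decreasing_by
  have h4 : PySem.Int.floordiv a 4 = a / 4 := PySem.Int.floordiv_eq_ediv_of_pos (by omega)
  omega

def pvSignature (a : Int) : Int := pvSigGo a 0

-- one step of the for-loop over the sorted signatures: state (best, run, prev)
def pvScanStep (st : Int × Int × Option Int) (s : Int) : Int × Int × Option Int :=
  match st with
  | (best, run, prev) =>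
    let (run', prev') := if prev = some s then (run + 1, prev) else ((1 : Int), some s)
    (if run' > best then run' else best, run', prev')

def most_4_compliant_alt (t : List Int) : Int :=
  if t.length < 2 then 0
  else
    let sigs := PySem.List.sorted (t.map pvSignature) (fun y => y) false
    let best := (sigs.foldl pvScanStep (0, 0, none)).1
    if best ≥ 2 then best else 0

-- ===== PRECONDITION & SPEC =====
def Spec_most_4_compliant (t : List Int) (out : Int) : Prop := out = most_4_compliant_alt t
instance (t : List Int) (out : Int) : Decidable (Spec_most_4_compliant t out) := by unfold Spec_most_4_compliant; infer_instance

-- ===== CLAIM (what is proved, stated in full; the proofs are below) =====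
def Claim_equal_most_4_compliant : Prop := ∀ (t : List Int), Dom_most_4_compliant t → Spec_most_4_compliant t (most_4_compliant t)

-- ===== LEMMAS AND PROOFS =====

-- max(l) with default 0, and the max signature-count of a list (the common value of both programs)
def pvMaxD (l : List Int) : Int := (PySem.List.max? l (fun y => y)).getD 0
def pvC (l : List Int) : Int := pvMaxD ((PySem.Set.ofList l).map (fun v => ((l.count v : Nat) : Int)))

-- spec of the run-scan on the tail: best run length, starting inside a run of prev of length r
def pvRuns : List Int → Int → Int → Int
  | [], _, r => r
  | x :: rest, p, r => if x = p then pvRuns rest p (r + 1) else max r (pvRuns rest x 1)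

theorem pvBin2dec_eq_15_iff : ∀ b0 b1 b2 b3 : Bool,
    pvBin2dec [b0, b1, b2, b3] = 15 ↔ ([b0, b1, b2, b3].all (fun b => b)) = true := by decide

theorem pvStep0 : ∀ b0 b1 b2 b3 : Bool,
    PySem.List.pySetD [b0, b1, b2, b3] (0 : Int) true = [true, b1, b2, b3] ∧
    PySem.Int.bor (pvBin2dec [b0, b1, b2, b3]) ((1 : Int) <<< (0 : Int).toNat)
      = pvBin2dec [true, b1, b2, b3] := by decide

theorem pvStep1 : ∀ b0 b1 b2 b3 : Bool,
    PySem.List.pySetD [b0, b1, b2, b3] (1 : Int) true = [b0, true, b2, b3] ∧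
    PySem.Int.bor (pvBin2dec [b0, b1, b2, b3]) ((1 : Int) <<< (1 : Int).toNat)
      = pvBin2dec [b0, true, b2, b3] := by decide

theorem pvStep2 : ∀ b0 b1 b2 b3 : Bool,
    PySem.List.pySetD [b0, b1, b2, b3] (2 : Int) true = [b0, b1, true, b3] ∧
    PySem.Int.bor (pvBin2dec [b0, b1, b2, b3]) ((1 : Int) <<< (2 : Int).toNat)
      = pvBin2dec [b0, b1, true, b3] := by decide

theorem pvStep3 : ∀ b0 b1 b2 b3 : Bool,
    PySem.List.pySetD [b0, b1, b2, b3] (3 : Int) true = [b0, b1, b2, true] ∧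
    PySem.Int.bor (pvBin2dec [b0, b1, b2, b3]) ((1 : Int) <<< (3 : Int).toNat)
      = pvBin2dec [b0, b1, b2, true] := by decide

theorem sigGo_eq (a : Int) (b0 b1 b2 b3 : Bool) :
    pvSigGo a (pvBin2dec [b0, b1, b2, b3]) = pvBin2dec (pvTypeLoop a [b0, b1, b2, b3]) := by
  rw [pvSigGo, pvTypeLoop]
  by_cases hc : a > 0 ∧ ¬ (([b0, b1, b2, b3].all (fun b => b)) = true)
  · rw [dif_pos hc, dif_pos ⟨hc.1, fun h => hc.2 ((pvBin2dec_eq_15_iff b0 b1 b2 b3).mp h)⟩]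
    have h0 : (0 : Int) < 4 := by omega
    have hm0 := PySem.Int.mod_nonneg a h0
    have hm4 := PySem.Int.mod_lt a h0
    have hcase : PySem.Int.mod a 4 = 0 ∨ PySem.Int.mod a 4 = 1 ∨
        PySem.Int.mod a 4 = 2 ∨ PySem.Int.mod a 4 = 3 := by omega
    rcases hcase with h | h | h | h <;> rw [h]
    · rw [(pvStep0 b0 b1 b2 b3).1, (pvStep0 b0 b1 b2 b3).2]; exact sigGo_eq _ _ _ _ _
    · rw [(pvStep1 b0 b1 b2 b3).1, (pvStep1 b0 b1 b2 b3).2]; exact sigGo_eq _ _ _ _ _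
    · rw [(pvStep2 b0 b1 b2 b3).1, (pvStep2 b0 b1 b2 b3).2]; exact sigGo_eq _ _ _ _ _
    · rw [(pvStep3 b0 b1 b2 b3).1, (pvStep3 b0 b1 b2 b3).2]; exact sigGo_eq _ _ _ _ _
  · rw [dif_neg hc, dif_neg (fun hc' =>
      hc ⟨hc'.1, fun h => hc'.2 ((pvBin2dec_eq_15_iff b0 b1 b2 b3).mpr h)⟩)]
termination_by a.toNat
decreasing_by all_goals
  (have h4 : PySem.Int.floordiv a 4 = a / 4 := PySem.Int.floordiv_eq_ediv_of_pos (by omega);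
   omega)

theorem signature_eq_typeOfComp (a : Int) : pvSignature a = pvTypeOfComp a := by
  have h : pvBin2dec [false, false, false, false] = 0 := by decide
  unfold pvSignature pvTypeOfComp
  rw [← h, sigGo_eq]

theorem sigGo_range (a m : Int) (h0 : 0 ≤ m) (h15 : m ≤ 15) :
    0 ≤ pvSigGo a m ∧ pvSigGo a m ≤ 15 := by
  rw [pvSigGo]
  by_cases hc : a > 0 ∧ m ≠ 15
  · rw [dif_pos hc]
    have hp : (0 : Int) < 4 := by omega
    have hm0 := PySem.Int.mod_nonneg a hp
    have hm4 := PySem.Int.mod_lt a hp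
    have hcase : PySem.Int.mod a 4 = 0 ∨ PySem.Int.mod a 4 = 1 ∨
        PySem.Int.mod a 4 = 2 ∨ PySem.Int.mod a 4 = 3 := by omega
    have hnew : 0 ≤ PySem.Int.bor m ((1 : Int) <<< (PySem.Int.mod a 4).toNat) ∧
        PySem.Int.bor m ((1 : Int) <<< (PySem.Int.mod a 4).toNat) ≤ 15 := by
      rcases hcase with h | h | h | h <;> rw [h] <;> interval_cases m <;> exact (by decide)
    exact sigGo_range _ _ hnew.1 hnew.2
  · rw [dif_neg hc]; exact ⟨h0, h15⟩
termination_by a.toNat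
decreasing_by all_goals
  (have h4 : PySem.Int.floordiv a 4 = a / 4 := PySem.Int.floordiv_eq_ediv_of_pos (by omega);
   omega)

theorem signature_range (a : Int) : 0 ≤ pvSignature a ∧ pvSignature a ≤ 15 :=
  sigGo_range a 0 (by omega) (by omega)

theorem pyGetD_eq_getElem (xs : List Int) (j : Int) (h0 : 0 ≤ j) (h : j < xs.length) :
    PySem.List.pyGetD xs j 0 = xs[j.toNat]?.getD 0 := by
  simp [PySem.List.pyGetD, PySem.List.pyGet?, PySem.List.pyIdx?, h0, h]

theorem hist_invariant (l : List Int) (ts : List Int) (hlen : ts.length = 17) :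
    (l.foldl pvHistStep ts).length = 17 ∧
    ∀ n : Nat, n < 17 →
      (l.foldl pvHistStep ts)[n]?.getD 0
        = ts[n]?.getD 0 + (((l.map pvSignature).count ((n : Nat) : Int) : Nat) : Int) := by
  induction l generalizing ts with
  | nil => exact ⟨hlen, fun n _ => by simp⟩
  | cons x l ih =>
    have hjx : 0 ≤ pvTypeOfComp x ∧ pvTypeOfComp x ≤ 15 := by
      rw [← signature_eq_typeOfComp]; exact signature_range x
    have hstep : pvHistStep ts x
        = ts.set (pvTypeOfComp x).toNat (PySem.List.pyGetD ts (pvTypeOfComp x) 0 + 1) := by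
      unfold pvHistStep
      exact PySem.List.pySetD_of_nonneg ts _ hjx.1
    have hlen' : (pvHistStep ts x).length = 17 := by
      rw [hstep, List.length_set]; exact hlen
    obtain ⟨ihl, ihg⟩ := ih (pvHistStep ts x) hlen'
    refine ⟨by simpa using ihl, ?_⟩
    intro n hn
    have hrec := ihg n hn
    simp only [List.foldl_cons] at *
    rw [hrec]
    have hkx : (pvTypeOfComp x).toNat < ts.length := by omega
    have hget : (pvHistStep ts x)[n]?.getD 0
        = if (pvTypeOfComp x).toNat = n then ts[n]?.getD 0 + 1 else ts[n]?.getD 0 := by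
      rw [hstep, List.getElem?_set]
      by_cases he : (pvTypeOfComp x).toNat = n
      · rw [if_pos he, if_pos hkx, pyGetD_eq_getElem ts _ hjx.1 (by omega), he]
        simp
      · rw [if_neg he, if_neg he]
    rw [hget]
    have hsig : pvSignature x = pvTypeOfComp x := signature_eq_typeOfComp x
    have hcnt : ((x :: l).map pvSignature).count ((n : Nat) : Int)
        = (l.map pvSignature).count ((n : Nat) : Int)
          + (if (pvTypeOfComp x).toNat = n then 1 else 0) := by
      simp only [List.map_cons, List.count_cons, hsig]
      by_cases he : (pvTypeOfComp x).toNat = n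
      · have : pvTypeOfComp x = ((n : Nat) : Int) := by omega
        simp [this]
      · have : pvTypeOfComp x ≠ ((n : Nat) : Int) := by omega
        simp [this, he]
    rw [hcnt]
    by_cases he : (pvTypeOfComp x).toNat = n <;> simp [he] <;> omega

-- the A-side histogram max equals the max count over the distinct signatures
theorem most4_core (t : List Int) (hlen : ¬ t.length < 2) :
    (PySem.List.max? (t.foldl pvHistStep (List.replicate 17 (0 : Int))) (fun y => y)).getD 0
      = pvC (t.map pvSignature) := by
  set sigs := t.map pvSignature with hsigs
  set types := t.foldl pvHistStep (List.replicate 17 (0 : Int)) with htypes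
  set L := (PySem.Set.ofList sigs).map (fun v => ((sigs.count v : Nat) : Int)) with hL
  obtain ⟨hT17, hTcnt⟩ := hist_invariant t (List.replicate 17 (0 : Int)) (by simp)
  have hTget : ∀ n : Nat, n < 17 → types[n]?.getD 0 = ((sigs.count ((n : Nat) : Int) : Nat) : Int) := by
    intro n hn
    have := hTcnt n hn
    rw [← htypes] at this
    rw [this, List.getElem?_replicate, if_pos hn]
    simp [hsigs]
  have hT17' : types.length = 17 := by rw [htypes]; exact hT17
  have hTne : types ≠ [] := by
    intro h; rw [h] at hT17'; simp at hT17'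
  obtain ⟨ma, hma⟩ : ∃ ma, PySem.List.max? types (fun y => y) = some ma := by
    cases h : PySem.List.max? types (fun y => y) with
    | none => exact absurd ((PySem.List.max?_eq_none_iff _ _).mp h) hTne
    | some m => exact ⟨m, rfl⟩
  have htne : t ≠ [] := by intro h; rw [h] at hlen; simp at hlen
  have hsne : sigs ≠ [] := by
    rw [hsigs]; simpa using htne
  have hLne : L ≠ [] := by
    rw [hL]
    intro h
    rcases List.exists_mem_of_ne_nil sigs hsne with ⟨s, hs⟩
    have : s ∈ PySem.Set.ofList sigs := (PySem.Set.mem_ofList sigs s).mpr hs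
    rw [List.map_eq_nil_iff] at h
    rw [h] at this
    simp at this
  obtain ⟨mb, hmb⟩ : ∃ mb, PySem.List.max? L (fun y => y) = some mb := by
    cases h : PySem.List.max? L (fun y => y) with
    | none => exact absurd ((PySem.List.max?_eq_none_iff _ _).mp h) hLne
    | some m => exact ⟨m, rfl⟩
  unfold pvC pvMaxD
  rw [hma, ← hL, hmb]
  have hmemT : ∀ y, y ∈ types → ∃ n : Nat, n < 17 ∧ y = ((sigs.count ((n : Nat) : Int) : Nat) : Int) := by
    intro y hy
    obtain ⟨n, hn, hyn⟩ := List.mem_iff_getElem.mp hy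
    refine ⟨n, by omega, ?_⟩
    rw [← hTget n (by omega)]
    rw [List.getElem?_eq_getElem hn, hyn]
    rfl
  have hmemB : ∀ s, s ∈ sigs → ((sigs.count s : Nat) : Int) ∈ L := by
    intro s hs
    rw [hL]
    exact List.mem_map_of_mem ((PySem.Set.mem_ofList sigs s).mpr hs)
  have hmemA : ∀ s, s ∈ sigs → ((sigs.count s : Nat) : Int) ∈ types := by
    intro s hs
    obtain ⟨x, _, hx⟩ := List.mem_map.mp (hsigs ▸ hs)
    have hrange : 0 ≤ s ∧ s ≤ 15 := hx ▸ signature_range x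
    have hs17 : s.toNat < 17 := by omega
    have := hTget s.toNat hs17
    have hcast : ((s.toNat : Nat) : Int) = s := by omega
    rw [hcast] at this
    have hlt : s.toNat < types.length := by omega
    rw [List.getElem?_eq_getElem hlt] at this
    simp only [Option.getD_some] at this
    exact this ▸ List.getElem_mem hlt
  have hab : ma ≤ mb := by
    obtain ⟨n, hn, hform⟩ := hmemT ma (PySem.List.max?_mem hma)
    by_cases hin : ((n : Nat) : Int) ∈ sigs
    · exact PySem.List.max?_isMax hmb _ (hform ▸ hmemB _ hin)
    · have : sigs.count ((n : Nat) : Int) = 0 := List.count_eq_zero.mpr hin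
      have hma0 : ma = 0 := by rw [hform, this]; rfl
      obtain ⟨s, _, hms⟩ := List.mem_map.mp (hL ▸ PySem.List.max?_mem hmb)
      have hmb0 : (0 : Int) ≤ mb := by rw [← hms]; exact Int.natCast_nonneg _
      omega
  have hba : mb ≤ ma := by
    obtain ⟨s, hsmem, hms⟩ := List.mem_map.mp (hL ▸ PySem.List.max?_mem hmb)
    have hs : s ∈ sigs := (PySem.Set.mem_ofList sigs s).mp hsmem
    exact PySem.List.max?_isMax hma _ (hms ▸ hmemA s hs)
  simp only [Option.getD_some]
  omega

-- ---- B-side lemmas: the run scan over the sorted list computes the same max count ----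

theorem runs_ge (m : List Int) (p r : Int) : r ≤ pvRuns m p r := by
  induction m generalizing p r with
  | nil => simp [pvRuns]
  | cons x rest ih =>
    by_cases h : x = p
    · simp only [pvRuns, if_pos h]
      have := ih p (r + 1)
      omega
    · simp only [pvRuns, if_neg h]
      exact le_max_left _ _

-- the foldl scan computes max best (pvRuns …)
theorem scan_inv (m : List Int) (b r p : Int) (hrb : r ≤ b) :
    (m.foldl pvScanStep (b, r, some p)).1 = max b (pvRuns m p r) := by
  induction m generalizing b r p with
  | nil => simp [pvRuns]; omega
  | cons x rest ih =>
    simp only [List.foldl_cons]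
    by_cases h : x = p
    · have hstep : pvScanStep (b, r, some p) x = (max b (r + 1), r + 1, some p) := by
        simp [pvScanStep, h, max_def]
        split <;> split <;> omega
      rw [hstep, ih _ _ _ (le_max_right _ _)]
      have h1 := runs_ge rest p (r + 1)
      simp only [pvRuns, if_pos h]
      omega
    · have hstep : pvScanStep (b, r, some p) x = (max b 1, 1, some x) := by
        have hne : ((some p : Option Int) = some x) → False := by
          simp only [Option.some.injEq]
          exact fun hh => h hh.symm
        simp [pvScanStep, hne, max_def]
        split <;> split <;> omega
      rw [hstep, ih _ _ _ (le_max_right _ _)]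
      have h1 := runs_ge rest x 1
      simp only [pvRuns, if_neg h]
      omega

theorem maxD_congr (l1 l2 : List Int) (h : ∀ y, y ∈ l1 ↔ y ∈ l2) : pvMaxD l1 = pvMaxD l2 := by
  unfold pvMaxD
  cases h1 : PySem.List.max? l1 (fun y => y) with
  | none =>
    have hn1 : l1 = [] := (PySem.List.max?_eq_none_iff _ _).mp h1
    have hn2 : l2 = [] := by
      cases l2 with
      | nil => rfl
      | cons y ys =>
        exact absurd ((h y).mpr (List.mem_cons_self)) (by simp [hn1])
    cases h2 : PySem.List.max? l2 (fun y => y) with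
    | none => rfl
    | some m2 => exact absurd (PySem.List.max?_mem h2) (by simp [hn2])
  | some m1 =>
    cases h2 : PySem.List.max? l2 (fun y => y) with
    | none =>
      have hn2 : l2 = [] := (PySem.List.max?_eq_none_iff _ _).mp h2
      exact absurd ((h m1).mp (PySem.List.max?_mem h1)) (by simp [hn2])
    | some m2 =>
      have h12 : m1 ≤ m2 := PySem.List.max?_isMax h2 _ ((h m1).mp (PySem.List.max?_mem h1))
      have h21 : m2 ≤ m1 := PySem.List.max?_isMax h1 _ ((h m2).mpr (PySem.List.max?_mem h2))
      simp only [Option.getD_some]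
      omega

-- counts in a list and in the same list with all copies of x removed
theorem count_filter_ne (l : List Int) (x v : Int) (h : v ≠ x) :
    (l.filter (fun y => y ≠ x)).count v = l.count v := by
  rw [List.count_filter]
  simp [h]

theorem foldl_max_eq (L : List Int) : ∀ a : Int,
    L.foldl max a = ((PySem.List.max? L (fun y => y)).map (fun m => max a m)).getD a := by
  induction L with
  | nil => intro a; simp [PySem.List.max?]
  | cons x xs ih =>
    intro a
    rw [List.foldl_cons, ih (max a x), PySem.List.max?_id_cons, ih x]
    cases h : PySem.List.max? xs (fun y => y) with
    | none => simp [h]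
    | some m => simp [h, max_assoc]

theorem maxD_cons (a : Int) (L : List Int) (ha : 0 ≤ a) :
    pvMaxD (a :: L) = max a (pvMaxD L) := by
  unfold pvMaxD
  rw [PySem.List.max?_id_cons]
  simp only [Option.getD_some]
  rw [foldl_max_eq]
  cases h : PySem.List.max? L (fun y => y) with
  | none => simp [h]; omega
  | some m => simp [h]

theorem pvC_cons (x : Int) (rest : List Int) :
    pvC (x :: rest) = max (((x :: rest).count x : Nat) : Int) (pvC (rest.filter (fun y => y ≠ x))) := by
  have hx : (0 : Int) < ((x :: rest).count x : Nat) := by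
    have : 0 < (x :: rest).count x := List.count_pos_iff.mpr (by simp)
    omega
  have key : pvC (x :: rest)
      = pvMaxD ((((x :: rest).count x : Nat) : Int) ::
          (PySem.Set.ofList (rest.filter (fun y => y ≠ x))).map
            (fun v => (((rest.filter (fun y => y ≠ x)).count v : Nat) : Int))) := by
    apply maxD_congr
    intro y
    constructor
    · intro hy
      obtain ⟨v, hvmem, hv⟩ := List.mem_map.mp hy
      have hvin : v ∈ x :: rest := (PySem.Set.mem_ofList _ _).mp hvmem
      by_cases hvx : v = x
      · exact List.mem_cons.mpr (Or.inl (by rw [← hv, hvx]))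
      · have hvrest : v ∈ rest := by
          rcases List.mem_cons.mp hvin with h | h
          · exact absurd h hvx
          · exact h
        have hvf : v ∈ rest.filter (fun y => y ≠ x) := by
          rw [List.mem_filter]; exact ⟨hvrest, by simpa using hvx⟩
        refine List.mem_cons.mpr (Or.inr (List.mem_map.mpr
          ⟨v, (PySem.Set.mem_ofList _ _).mpr hvf, ?_⟩))
        rw [count_filter_ne rest x v hvx, ← hv]
        have hnxv : ¬ (x = v) := fun hh => hvx hh.symm
        rw [List.count_cons]
        simp [hnxv]
    · intro hy
      rcases List.mem_cons.mp hy with h | h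
      · exact List.mem_map.mpr ⟨x, (PySem.Set.mem_ofList _ _).mpr (by simp), h.symm⟩
      · obtain ⟨v, hvmem, hv⟩ := List.mem_map.mp h
        have hvf : v ∈ rest.filter (fun y => y ≠ x) := (PySem.Set.mem_ofList _ _).mp hvmem
        have hvx : v ≠ x := by
          have := (List.mem_filter.mp hvf).2
          simpa using this
        have hvrest : v ∈ rest := (List.mem_filter.mp hvf).1
        refine List.mem_map.mpr ⟨v, (PySem.Set.mem_ofList _ _).mpr (List.mem_cons_of_mem x hvrest), ?_⟩
        rw [← hv, count_filter_ne rest x v hvx]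
        have hnxv : ¬ (x = v) := fun hh => hvx hh.symm
        rw [List.count_cons]
        simp [hnxv]
  rw [key]
  unfold pvC
  exact maxD_cons _ _ (le_of_lt hx)

theorem runs_sorted (m : List Int) (p r : Int) (hm : m.Pairwise (fun a b => a ≤ b))
    (hall : ∀ y ∈ m, p ≤ y) (hr : 1 ≤ r) :
    pvRuns m p r = max (r + ((m.count p : Nat) : Int)) (pvC (m.filter (fun y => y ≠ p))) := by
  induction m generalizing p r with
  | nil =>
    have hC : pvC ([] : List Int) = 0 := by decide
    simp only [pvRuns, List.count_nil, List.filter_nil, hC, Nat.cast_zero]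
    omega
  | cons x rest ih =>
    rcases List.pairwise_cons.mp hm with ⟨hxall, hrest⟩
    by_cases h : x = p
    · simp only [pvRuns, if_pos h]
      rw [ih p (r + 1) hrest (fun y hy => h ▸ hxall y hy) (by omega)]
      have hc : (((x :: rest).count p : Nat) : Int) = ((rest.count p : Nat) : Int) + 1 := by
        rw [h, List.count_cons]
        simp
      have hf : (x :: rest).filter (fun y => y ≠ p) = rest.filter (fun y => y ≠ p) := by
        simp [List.filter_cons, h]
      rw [hf, hc]
      omega
    · have hpx : p < x := lt_of_le_of_ne (hall x (by simp)) (fun hh => h hh.symm)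
      have hpn : (x :: rest).count p = 0 := by
        rw [List.count_eq_zero]
        intro hmem
        rcases List.mem_cons.mp hmem with hh | hh
        · exact h hh.symm
        · exact absurd (hxall p hh) (by omega)
      have hf : (x :: rest).filter (fun y => y ≠ p) = x :: rest := by
        rw [List.filter_eq_self]
        intro y hy
        rcases List.mem_cons.mp hy with hh | hh
        · simp [hh]; omega
        · have := hxall y hh; simp; omega
      have h1c : (1 : Int) + ((rest.count x : Nat) : Int) = (((x :: rest).count x : Nat) : Int) := by
        rw [List.count_cons]
        simp
        omega
      simp only [pvRuns, if_neg h]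
      rw [ih x 1 hrest hxall (by omega), hpn, hf, pvC_cons x rest, ← h1c]
      simp only [Nat.cast_zero]
      omega

-- membership of the count lists is preserved by sorting
theorem pvC_sorted (l : List Int) :
    pvC (PySem.List.sorted l (fun y => y) false) = pvC l := by
  have hperm : (PySem.List.sorted l (fun y => y) false).Perm l := PySem.List.sorted_perm l _ _
  unfold pvC
  apply maxD_congr
  intro y
  constructor
  · intro hy
    obtain ⟨v, hvmem, hv⟩ := List.mem_map.mp hy
    have hvin : v ∈ l := hperm.mem_iff.mp ((PySem.Set.mem_ofList _ _).mp hvmem)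
    refine List.mem_map.mpr ⟨v, (PySem.Set.mem_ofList _ _).mpr hvin, ?_⟩
    rw [← hv, hperm.count_eq]
  · intro hy
    obtain ⟨v, hvmem, hv⟩ := List.mem_map.mp hy
    have hvin : v ∈ PySem.List.sorted l (fun y => y) false :=
      hperm.mem_iff.mpr ((PySem.Set.mem_ofList _ _).mp hvmem)
    refine List.mem_map.mpr ⟨v, (PySem.Set.mem_ofList _ _).mpr hvin, ?_⟩
    rw [← hv, hperm.count_eq]

-- the full B-side scan equals the max count
theorem scan_eq_pvC (l : List Int) (hne : l ≠ []) :
    ((PySem.List.sorted l (fun y => y) false).foldl pvScanStep (0, 0, none)).1 = pvC l := by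
  rw [← pvC_sorted l]
  obtain ⟨x, rest, hxr⟩ : ∃ x rest, PySem.List.sorted l (fun y => y) false = x :: rest := by
    cases h : PySem.List.sorted l (fun y => y) false with
    | nil => exact absurd ((PySem.List.sorted_eq_nil_iff _ _ _).mp h) hne
    | cons x rest => exact ⟨x, rest, rfl⟩
  have hpw : (x :: rest).Pairwise (fun a b => a ≤ b) := by
    rw [← hxr]
    exact PySem.List.sorted_pairwise l _
  rcases List.pairwise_cons.mp hpw with ⟨hxall, hrest⟩
  rw [hxr]
  simp only [List.foldl_cons]
  have hstep : pvScanStep ((0 : Int), (0 : Int), (none : Option Int)) x = (1, 1, some x) := by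
    simp [pvScanStep]
  rw [hstep, scan_inv rest 1 1 x (le_refl _)]
  rw [runs_sorted rest x 1 hrest hxall (le_refl _)]
  rw [pvC_cons x rest]
  have h1c : (1 : Int) + ((rest.count x : Nat) : Int) = (((x :: rest).count x : Nat) : Int) := by
    rw [List.count_cons]
    simp
    omega
  rw [← h1c]
  have h1 : (1 : Int) ≤ (((x :: rest).count x : Nat) : Int) := by
    have : 0 < (x :: rest).count x := List.count_pos_iff.mpr (by simp)
    omega
  omega

-- ===== VERDICT (by name: the statement is the Claim_ definition above) =====
theorem most_4_compliant_spec : Claim_equal_most_4_compliant := by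
  intro t _hdom
  unfold Spec_most_4_compliant most_4_compliant most_4_compliant_alt
  by_cases hlen : t.length < 2
  · rw [if_pos hlen, if_pos hlen]
  · rw [if_neg hlen, if_neg hlen]
    dsimp only
    have hne : t.map pvSignature ≠ [] := by
      intro h
      rw [List.map_eq_nil_iff] at h
      rw [h] at hlen
      simp at hlen
    rw [most4_core t hlen, scan_eq_pvC (t.map pvSignature) hne]
    by_cases h2 : pvC (t.map pvSignature) < 2
    · rw [if_pos h2, if_neg (by omega)]
    · rw [if_neg h2, if_pos (by omega)]
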